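-- pv_equiv track=rewrite | github.com/ErinCoughlan/CS158FinalProject | algorithms/user_cf_mr.py | count_ratings_users_freq
-- ===== SOURCE A (Python) =====
-- def count_ratings_users_freq(item_id, values):
--     '''
--     For each item, emit a row containing their user + rating pairs
--     Also emit user rating sum and count for use later steps.
--
--     '''
--     user_count = 0
--     user_sum = 0
--     final = []
--     for user_id, rating in values:
--         user_count += 1
--         user_sum += rating
--         final.append((user_id, rating))
--
--     yield item_id, (user_count, user_sum, final)
-- ===== SOURCE B (Python) =====
-- def count_ratings_users_freq(item_id, values):
--     '''Divide-and-conquer: recursively split the pair list in halves and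
--     merge (count, sum, pairs) triples; recursion depth is O(log n).'''
--     pairs = list(values)
--
--     def agg(lo, hi):
--         n = hi - lo
--         if n == 0:
--             return (0, 0, [])
--         if n == 1:
--             user_id, rating = pairs[lo]
--             return (1, rating, [(user_id, rating)])
--         mid = (lo + hi) // 2
--         c1, s1, f1 = agg(lo, mid)
--         c2, s2, f2 = agg(mid, hi)
--         return (c1 + c2, s1 + s2, f1 + f2)
--
--     yield item_id, agg(0, len(pairs))
-- ===== Notes on version B (the rewrite author's own statement) =====
-- stated objective: alternative
-- what changed: Replaced the single fused accumulator loop with a divide-and-conquer recursion that splits the pair list in halves and merges (count, sum, pairs) triples; correctness relies on associativity of the merge.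
import Mathlib
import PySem

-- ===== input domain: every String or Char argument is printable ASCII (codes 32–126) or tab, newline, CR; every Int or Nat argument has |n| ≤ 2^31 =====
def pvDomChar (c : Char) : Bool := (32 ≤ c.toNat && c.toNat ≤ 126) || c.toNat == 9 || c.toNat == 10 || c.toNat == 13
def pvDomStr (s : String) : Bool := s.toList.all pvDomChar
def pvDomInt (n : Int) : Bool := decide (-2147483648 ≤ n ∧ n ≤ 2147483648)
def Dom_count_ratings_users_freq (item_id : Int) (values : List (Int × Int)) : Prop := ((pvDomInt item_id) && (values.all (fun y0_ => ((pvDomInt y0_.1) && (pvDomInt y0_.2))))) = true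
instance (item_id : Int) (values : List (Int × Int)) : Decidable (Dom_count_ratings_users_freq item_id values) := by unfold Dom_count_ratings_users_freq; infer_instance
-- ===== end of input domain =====

-- B replaces A's fused accumulator loop by a divide-and-conquer merge of (count, sum, pairs) triples; objective: alternative structure, same result.

-- ===== PORT A =====
-- A: one fused loop maintaining (user_count, user_sum, final) together, then yield once.
def count_ratings_users_freq (item_id : Int) (values : List (Int × Int)) : List (Int × (Int × Int × (List (Int × Int)))) :=
  let st := values.foldl
    (fun (st : Int × Int × List (Int × Int)) uv =>
      (st.1 + 1, st.2.1 + uv.2, st.2.2 ++ [(uv.1, uv.2)]))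
    (0, 0, [])
  [(item_id, (st.1, st.2.1, st.2.2))]

-- ===== PORT B =====
-- B's agg(lo, hi) on the materialized list, transcribed as recursion on the sublist pairs[lo:hi]
-- (the half-splitting at mid = (lo+hi)//2 becomes take/drop at length/2).
def crfAgg (l : List (Int × Int)) : Int × Int × List (Int × Int) :=
  match l with
  | [] => (0, 0, [])
  | [p] => (1, p.2, [(p.1, p.2)])
  | p :: q :: r =>
    let full := p :: q :: r
    let mid := full.length / 2
    let a := crfAgg (full.take mid)
    let b := crfAgg (full.drop mid)
    (a.1 + b.1, a.2.1 + b.2.1, a.2.2 ++ b.2.2)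
termination_by l.length
decreasing_by
  · simp [List.length_take]; omega
  · simp [List.length_drop]; omega

def count_ratings_users_freq_alt (item_id : Int) (values : List (Int × Int)) : List (Int × (Int × Int × (List (Int × Int)))) :=
  [(item_id, crfAgg values)]

-- ===== PRECONDITION & SPEC =====
def Spec_count_ratings_users_freq (item_id : Int) (values : List (Int × Int)) (out : List (Int × (Int × Int × (List (Int × Int))))) : Prop := out = count_ratings_users_freq_alt item_id values
instance (item_id : Int) (values : List (Int × Int)) (out : List (Int × (Int × Int × (List (Int × Int))))) : Decidable (Spec_count_ratings_users_freq item_id values out) := by unfold Spec_count_ratings_users_freq; infer_instance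

-- ===== CLAIM =====
def Claim_equal_count_ratings_users_freq : Prop := ∀ (item_id : Int) (values : List (Int × Int)), Dom_count_ratings_users_freq item_id values → Spec_count_ratings_users_freq item_id values (count_ratings_users_freq item_id values)

-- ===== LEMMAS AND PROOFS =====
lemma crf_fold (values : List (Int × Int)) (c s : Int) (acc : List (Int × Int)) :
    values.foldl
      (fun (st : Int × Int × List (Int × Int)) uv =>
        (st.1 + 1, st.2.1 + uv.2, st.2.2 ++ [(uv.1, uv.2)]))
      (c, s, acc)
    = (c + values.length, s + (values.map (fun uv => uv.2)).sum, acc ++ values) := by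
  induction values generalizing c s acc with
  | nil => simp
  | cons h t ih =>
      simp [List.foldl, ih, List.sum_cons]
      constructor
      · ring
      · ring

lemma crfAgg_eq (l : List (Int × Int)) :
    crfAgg l = ((l.length : Int), (l.map (fun uv => uv.2)).sum, l) := by
  induction hn : l.length using Nat.strong_induction_on generalizing l with
  | _ n ih =>
    match l with
    | [] => subst hn; simp [crfAgg]
    | [p] => subst hn; simp [crfAgg]
    | p :: q :: r =>
      subst hn
      rw [crfAgg]
      have h1 : crfAgg ((p :: q :: r).take ((p :: q :: r).length / 2))
          = ((((p :: q :: r).take ((p :: q :: r).length / 2)).length : Int),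
             (((p :: q :: r).take ((p :: q :: r).length / 2)).map (fun uv => uv.2)).sum,
             (p :: q :: r).take ((p :: q :: r).length / 2)) := by
        apply ih
        · simp [List.length_take]; omega
        · rfl
      have h2 : crfAgg ((p :: q :: r).drop ((p :: q :: r).length / 2))
          = ((((p :: q :: r).drop ((p :: q :: r).length / 2)).length : Int),
             (((p :: q :: r).drop ((p :: q :: r).length / 2)).map (fun uv => uv.2)).sum,
             (p :: q :: r).drop ((p :: q :: r).length / 2)) := by
        apply ih
        · simp [List.length_drop]; omega
        · rfl
      simp only [h1, h2, Prod.mk.injEq]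
      refine ⟨?_, ?_, ?_⟩
      · rw [← Nat.cast_add, List.length_take, List.length_drop]
        congr 1
        omega
      · rw [← List.sum_append, ← List.map_append, List.take_append_drop]
      · exact List.take_append_drop _ _

-- ===== VERDICT =====
theorem count_ratings_users_freq_spec : Claim_equal_count_ratings_users_freq := by
  intro item_id values _
  unfold Spec_count_ratings_users_freq count_ratings_users_freq count_ratings_users_freq_alt
  simp [crf_fold, crfAgg_eq]
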